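-- pv_equiv track=rewrite | github.com/gobbleyourdong/tsunami | tsunami/tests/test_image_ceiling.py | _count_images_since_write
-- ===== SOURCE A (Python) =====
-- def _count_images_since_write(tool_history: list[str]) -> int:
--     """Mirror of the counter in agent.py. Returns how many generate_image
--     calls sit at the tail of the history before the most recent write."""
--     count = 0
--     for t in reversed(tool_history):
--         if t in ("file_write", "file_edit"):
--             break
--         if t == "generate_image":
--             count += 1
--     return count
-- ===== SOURCE B (Python) =====
-- def _count_images_since_write(tool_history: list[str]) -> int:
--     # Forward single pass: reset the counter at every write, bump it at every image.
--     count = 0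
--     for t in tool_history:
--         if t in ("file_write", "file_edit"):
--             count = 0
--         elif t == "generate_image":
--             count += 1
--     return count
-- ===== Notes on version B (the rewrite author's own statement) =====
-- stated objective: alternative
-- what changed: Replaces the reversed scan with early break by a forward single pass that resets a counter on each write and increments it on each image.
import Mathlib
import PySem

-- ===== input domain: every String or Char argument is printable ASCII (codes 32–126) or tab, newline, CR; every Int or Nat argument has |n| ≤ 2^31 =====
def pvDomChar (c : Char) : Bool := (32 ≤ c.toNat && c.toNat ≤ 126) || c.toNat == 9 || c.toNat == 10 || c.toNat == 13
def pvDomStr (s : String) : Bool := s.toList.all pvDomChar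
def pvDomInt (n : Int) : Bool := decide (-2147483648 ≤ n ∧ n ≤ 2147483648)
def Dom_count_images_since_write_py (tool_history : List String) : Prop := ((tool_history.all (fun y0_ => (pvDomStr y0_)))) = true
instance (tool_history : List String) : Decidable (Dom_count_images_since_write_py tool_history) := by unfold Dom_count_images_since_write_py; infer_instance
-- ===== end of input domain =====

-- B is a forward single pass with a reset-on-write accumulator instead of A's reversed scan with early break; same O(n) cost.

-- ===== PORT A =====
-- A's `for t in reversed(...)` loop with `break`: structural recursion over the reversed list,
-- stopping (returning the accumulated count unchanged from there on) at the first write label.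
def countImagesLoopA : List String → Int
  | [] => 0
  | t :: rest =>
    if t = "file_write" ∨ t = "file_edit" then 0
    else (if t = "generate_image" then 1 else 0) + countImagesLoopA rest

def count_images_since_write_py (tool_history : List String) : Int :=
  countImagesLoopA tool_history.reverse

-- ===== PORT B =====
def count_images_since_write_py_alt (tool_history : List String) : Int :=
  tool_history.foldl
    (fun count t =>
      if t = "file_write" ∨ t = "file_edit" then 0
      else if t = "generate_image" then count + 1 else count)
    0

-- ===== PRECONDITION & SPEC =====
def Spec_count_images_since_write_py (tool_history : List String) (out : Int) : Prop := out = count_images_since_write_py_alt tool_history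
instance (tool_history : List String) (out : Int) : Decidable (Spec_count_images_since_write_py tool_history out) := by unfold Spec_count_images_since_write_py; infer_instance

-- ===== CLAIM (what is proved, stated in full; the proofs are below) =====
def Claim_equal_count_images_since_write_py : Prop := ∀ (tool_history : List String), Dom_count_images_since_write_py tool_history → Spec_count_images_since_write_py tool_history (count_images_since_write_py tool_history)

-- ===== LEMMAS AND PROOFS =====

-- B's fold from an arbitrary starting count: equals the trailing-image count, plus the start
-- value when no write occurs in the list (the counter is never reset).
theorem countImages_foldl_eq (l : List String) : ∀ (c : Int),
    l.foldl
      (fun count t =>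
        if t = "file_write" ∨ t = "file_edit" then 0
        else if t = "generate_image" then count + 1 else count)
      c
    = countImagesLoopA l.reverse
      + (if l.any (fun t => decide (t = "file_write" ∨ t = "file_edit")) then 0 else c) := by
  induction l using List.reverseRecOn with
  | nil => intro c; simp [countImagesLoopA]
  | append_singleton l t ih =>
    intro c
    rw [List.foldl_append]
    simp only [List.foldl_cons, List.foldl_nil, List.reverse_append, List.reverse_singleton,
      List.singleton_append, List.any_append, List.any_cons, List.any_nil, countImagesLoopA]
    by_cases hw : t = "file_write" ∨ t = "file_edit"
    · simp [hw]
    · by_cases hi : t = "generate_image" <;> simp [hw, hi, ih] <;> split <;> ring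

-- ===== VERDICT (by name: the statement is the Claim_ definition above) =====
theorem count_images_since_write_py_spec : Claim_equal_count_images_since_write_py := by
  intro l _
  unfold Spec_count_images_since_write_py count_images_since_write_py count_images_since_write_py_alt
  rw [countImages_foldl_eq]
  split <;> ring
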